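-- pv_equiv track=rewrite | github.com/zhuobinggang/honda | taku_reader2.py | print_sentence
-- ===== SOURCE A (Python) =====
-- def token_transfer_by_titles(tokens, titles, i, last, then):
--     last_is_title = titles[last] if last > -1 else False
--     next_is_title = titles[then] if then < len(tokens) else False
--     current_is_title = titles[i]
--     if current_is_title:
--         if not last_is_title: # 唯一需要特殊对待的情况
--             # False True 的情况，增加左标记
--             tokens[i] = '【' + tokens[i]
--         if not next_is_title:
--             # True False 的情况，增加右标记
--             tokens[i] = tokens[i] + '】'
--
-- def token_transfer_by_labels(tokens, ls, i, last, then):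
--     last_is_emphasize = ls[last] if last > -1 else False
--     next_is_emphasize = ls[then] if then < len(tokens) else False
--     current_is_emphasize = ls[i]
--     if current_is_emphasize:
--         if not last_is_emphasize: # 唯一需要特殊对待的情况
--             # False True 的情况，增加左标记
--             tokens[i] = '<u>' + tokens[i]
--         if not next_is_emphasize:
--             # True False 的情况，增加右标记
--             tokens[i] = tokens[i] + '</u>'
--
-- def token_transfer_by_emphasizes(tokens, emphasizes, i, last, then):
--     last_is_emphasize = emphasizes[last] if last > -1 else False
--     next_is_emphasize = emphasizes[then] if then < len(tokens) else False
--     current_is_emphasize = emphasizes[i]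
--     if current_is_emphasize:
--         if not last_is_emphasize: # 唯一需要特殊对待的情况
--             # False True 的情况，增加左标记
--             tokens[i] = '<span style="background-color:rgba(255, 87, 51, 0.5);">' + tokens[i]
--         if not next_is_emphasize:
--             # True False 的情况，增加右标记
--             tokens[i] = tokens[i] + '</span>'
--
-- def print_sentence(item, emphasizes = None):
--     tokens, ls, titles, paras = item
--     tokens = tokens.copy()
--     for i in range(len(tokens)):
--         last = i - 1
--         then = i + 1
--         token_transfer_by_titles(tokens, titles, i, last, then)
--         token_transfer_by_labels(tokens, ls, i, last, then)
--         if emphasizes: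
--             token_transfer_by_emphasizes(tokens, emphasizes, i, last, then)
--     text = ''.join(tokens)
--     # 段落情报
--     if paras[0] == 1:
--         text = '□' + text
--     return text
-- ===== SOURCE B (Python) =====
-- def print_sentence(item, emphasizes=None):
--     tokens, ls, titles, paras = item
--     toks = list(tokens)
--     n = len(toks)
--
--     def mark_runs(flags, left, right):
--         inside = False
--         for i in range(n):
--             if flags[i]:
--                 if not inside:
--                     toks[i] = left + toks[i]
--                     inside = True
--                 if i + 1 >= n or not flags[i + 1]:
--                     toks[i] = toks[i] + right
--                     inside = False
--
--     mark_runs(titles, '【', '】')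
--     mark_runs(ls, '<u>', '</u>')
--     if emphasizes:
--         mark_runs(emphasizes, '<span style="background-color:rgba(255, 87, 51, 0.5);">', '</span>')
--     text = ''.join(toks)
--     if paras[0] == 1:
--         text = '□' + text
--     return text
-- ===== Notes on version B (the rewrite author's own statement) =====
-- stated objective: simpler
-- what changed: Replaces the per-token interleaving of three marker categories (each re-testing both neighbours via three near-identical helper functions) with one generic run-marking pass, applied sequentially per category, that keeps only an 'inside a run' flag and tags the first and last token of each maximal truthy run.
import Mathlib
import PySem

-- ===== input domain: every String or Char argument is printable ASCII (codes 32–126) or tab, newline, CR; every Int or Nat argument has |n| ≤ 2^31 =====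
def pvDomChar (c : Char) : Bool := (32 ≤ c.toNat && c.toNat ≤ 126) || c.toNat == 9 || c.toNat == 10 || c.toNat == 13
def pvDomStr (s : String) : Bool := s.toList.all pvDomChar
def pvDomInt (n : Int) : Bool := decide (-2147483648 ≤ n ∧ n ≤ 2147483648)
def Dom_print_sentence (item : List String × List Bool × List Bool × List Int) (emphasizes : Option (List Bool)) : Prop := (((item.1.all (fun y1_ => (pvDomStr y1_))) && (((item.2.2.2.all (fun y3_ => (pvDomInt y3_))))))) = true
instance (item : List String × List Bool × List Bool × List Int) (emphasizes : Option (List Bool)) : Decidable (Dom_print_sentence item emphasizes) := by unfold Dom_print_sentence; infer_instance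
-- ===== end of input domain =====

-- B replaces the three per-token neighbour-testing helper functions by one generic
-- run-marking pass (kept `inside`-flag), applied once per marker category: simpler.

-- ===== PORT A =====
def token_transfer_by_titles (tokens : List String) (titles : List Bool) (i last then_ : Int) : List String :=
  let last_is_title := if last > -1 then PySem.List.pyGetD titles last false else false
  let next_is_title := if then_ < (tokens.length : Int) then PySem.List.pyGetD titles then_ false else false
  let current_is_title := PySem.List.pyGetD titles i false
  if current_is_title then
    let tokens' := if !last_is_title then
        PySem.List.pySetD tokens i ("【" ++ PySem.List.pyGetD tokens i "") else tokens
    if !next_is_title then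
        PySem.List.pySetD tokens' i (PySem.List.pyGetD tokens' i "" ++ "】") else tokens'
  else tokens

def token_transfer_by_labels (tokens : List String) (ls : List Bool) (i last then_ : Int) : List String :=
  let last_is := if last > -1 then PySem.List.pyGetD ls last false else false
  let next_is := if then_ < (tokens.length : Int) then PySem.List.pyGetD ls then_ false else false
  let current_is := PySem.List.pyGetD ls i false
  if current_is then
    let tokens' := if !last_is then
        PySem.List.pySetD tokens i ("<u>" ++ PySem.List.pyGetD tokens i "") else tokens
    if !next_is then
        PySem.List.pySetD tokens' i (PySem.List.pyGetD tokens' i "" ++ "</u>") else tokens'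
  else tokens

def token_transfer_by_emphasizes (tokens : List String) (emphasizes : List Bool) (i last then_ : Int) : List String :=
  let last_is := if last > -1 then PySem.List.pyGetD emphasizes last false else false
  let next_is := if then_ < (tokens.length : Int) then PySem.List.pyGetD emphasizes then_ false else false
  let current_is := PySem.List.pyGetD emphasizes i false
  if current_is then
    let tokens' := if !last_is then
        PySem.List.pySetD tokens i ("<span style=\"background-color:rgba(255, 87, 51, 0.5);\">" ++ PySem.List.pyGetD tokens i "") else tokens
    if !next_is then
        PySem.List.pySetD tokens' i (PySem.List.pyGetD tokens' i "" ++ "</span>") else tokens'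
  else tokens

def print_sentence (item : List String × List Bool × List Bool × List Int) (emphasizes : Option (List Bool)) : String :=
  match item with
  | (tokens, ls, titles, paras) =>
    let tokens := (PySem.List.pyRange 0 (tokens.length : Int) 1).foldl (fun tokens i =>
        let last := i - 1
        let then_ := i + 1
        let tokens := token_transfer_by_titles tokens titles i last then_
        let tokens := token_transfer_by_labels tokens ls i last then_
        match emphasizes with
        | some e => if e ≠ [] then token_transfer_by_emphasizes tokens e i last then_ else tokens
        | none => tokens) tokens
    let text := PySem.Str.join "" tokens
    if PySem.List.pyGetD paras 0 0 == 1 then "□" ++ text else text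

-- ===== PORT B =====
-- one generic pass: mark maximal truthy runs of `flags` with left/right markers
def mark_runs (n : Nat) (flags : List Bool) (left right : String) (toks : List String) : List String :=
  ((List.range n).foldl (fun (st : List String × Bool) i =>
      let toks := st.1
      let inside := st.2
      if flags.getD i false = true then
        let p := if inside = false then (toks.set i (left ++ toks.getD i ""), true) else (toks, inside)
        if n ≤ i + 1 ∨ flags.getD (i+1) false = false then
          (p.1.set i (p.1.getD i "" ++ right), false)
        else p
      else (toks, inside)) (toks, false)).1

def print_sentence_alt (item : List String × List Bool × List Bool × List Int) (emphasizes : Option (List Bool)) : String :=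
  match item with
  | (tokens, ls, titles, paras) =>
    let n := tokens.length
    let toks := mark_runs n titles "【" "】" tokens
    let toks := mark_runs n ls "<u>" "</u>" toks
    let toks := match emphasizes with
      | some e => if e ≠ [] then
          mark_runs n e "<span style=\"background-color:rgba(255, 87, 51, 0.5);\">" "</span>" toks
        else toks
      | none => toks
    let text := PySem.Str.join "" toks
    if paras.getD 0 0 == 1 then "□" ++ text else text

-- ===== PRECONDITION & SPEC =====
-- Pre_ excludes exactly the inputs where Python A raises IndexError: empty paras
-- (paras[0]) or a flag list shorter than tokens (titles[i] / ls[i] / emphasizes[i]).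
def Pre_print_sentence (item : List String × List Bool × List Bool × List Int) (emphasizes : Option (List Bool)) : Prop :=
  item.2.2.2 ≠ [] ∧ item.1.length ≤ item.2.1.length ∧ item.1.length ≤ item.2.2.1.length ∧
    (emphasizes.getD [] = [] ∨ item.1.length ≤ (emphasizes.getD []).length)
instance (item : List String × List Bool × List Bool × List Int) (emphasizes : Option (List Bool)) : Decidable (Pre_print_sentence item emphasizes) := by unfold Pre_print_sentence; infer_instance

def pvWitness_print_sentence : (List String × List Bool × List Bool × List Int) × Option (List Bool) :=
  ((["a", "b", "c"], [false, true, true], [true, true, false], [1]), some [false, true, false])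

def Spec_print_sentence (item : List String × List Bool × List Bool × List Int) (emphasizes : Option (List Bool)) (out : String) : Prop := out = print_sentence_alt item emphasizes
instance (item : List String × List Bool × List Bool × List Int) (emphasizes : Option (List Bool)) (out : String) : Decidable (Spec_print_sentence item emphasizes out) := by unfold Spec_print_sentence; infer_instance

-- ===== CLAIM (what is proved, stated in full; the proofs are below) =====
def Claim_equal_print_sentence : Prop := ∀ (item : List String × List Bool × List Bool × List Int) (emphasizes : Option (List Bool)), Dom_print_sentence item emphasizes → Pre_print_sentence item emphasizes → Spec_print_sentence item emphasizes (print_sentence item emphasizes)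

-- ===== LEMMAS AND PROOFS =====

-- the decoration both programs apply to token i, as a pure function of the flags
def decor (flags : List Bool) (l r : String) (n i : Nat) (t : String) : String :=
  if flags.getD i false = true then
    (if i = 0 ∨ flags.getD (i-1) false = false then l else "") ++ t ++
    (if n ≤ i + 1 ∨ flags.getD (i+1) false = false then r else "")
  else t

-- B's loop step, named (definitionally the lambda inside mark_runs)
def stepB (n : Nat) (flags : List Bool) (left right : String) (st : List String × Bool) (i : Nat) : List String × Bool :=
  let toks := st.1
  let inside := st.2
  if flags.getD i false = true then
    let p := if inside = false then (toks.set i (left ++ toks.getD i ""), true) else (toks, inside)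
    if n ≤ i + 1 ∨ flags.getD (i+1) false = false then
      (p.1.set i (p.1.getD i "" ++ right), false)
    else p
  else (toks, inside)

-- the invariant value of B's `inside` flag before step m
def insideInv (n : Nat) (flags : List Bool) (m : Nat) : Bool :=
  decide (0 < m) && flags.getD (m-1) false && flags.getD m false && decide (m < n)

-- the composite decoration A applies to token i in one loop iteration
def decorAll (emphasizes : Option (List Bool)) (ls titles : List Bool) (n i : Nat) (s : String) : String :=
  match emphasizes with
  | some e =>
      if e ≠ [] then
        decor e "<span style=\"background-color:rgba(255, 87, 51, 0.5);\">" "</span>" n i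
          (decor ls "<u>" "</u>" n i (decor titles "【" "】" n i s))
      else decor ls "<u>" "</u>" n i (decor titles "【" "】" n i s)
  | none => decor ls "<u>" "</u>" n i (decor titles "【" "】" n i s)

theorem set_getD_eq_modify (toks : List String) (k : Nat) (f : String → String) :
    toks.set k (f (toks.getD k "")) = toks.modify k f := by
  rw [List.modify_eq_set]; simp [List.getD_eq_getElem?_getD]

theorem modify_modify_same (toks : List String) (k : Nat) (f g : String → String) :
    (toks.modify k f).modify k g = toks.modify k (fun t => g (f t)) := by
  apply List.ext_getElem?
  intro j
  simp [List.getElem?_modify]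
  cases toks[j]? <;> simp
  split <;> simp

theorem modify_comm (toks : List String) (i j : Nat) (h : i ≠ j) (f g : String → String) :
    (toks.modify i f).modify j g = (toks.modify j g).modify i f := by
  apply List.ext_getElem?
  intro m
  simp [List.getElem?_modify]
  cases toks[m]? <;> simp
  split <;> split <;> simp_all

theorem modify_id (toks : List String) (k : Nat) :
    toks.modify k (fun t => t) = toks := by
  apply List.ext_getElem?
  intro m
  simp [List.getElem?_modify]

theorem set_prepend (toks : List String) (k : Nat) (a : String) :
    toks.set k (a ++ toks.getD k "") = toks.modify k (fun t => a ++ t) :=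
  set_getD_eq_modify toks k _

theorem set_append (toks : List String) (k : Nat) (b : String) :
    toks.set k (toks.getD k "" ++ b) = toks.modify k (fun t => t ++ b) :=
  set_getD_eq_modify toks k (fun t => t ++ b)

theorem tt_eq_modify_titles (toks : List String) (flags : List Bool) (k : Nat)
    (hk : k < toks.length) :
    token_transfer_by_titles toks flags (k : Int) ((k : Int) - 1) ((k : Int) + 1)
      = toks.modify k (decor flags "【" "】" toks.length k) := by
  have hlast : (if ((k:Int) - 1) > -1 then PySem.List.pyGetD flags ((k:Int)-1) false else false)
      = if k = 0 ∨ flags.getD (k-1) false = false then false else true := by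
    rcases Nat.eq_zero_or_pos k with h0 | h0
    · subst h0; norm_num
    · have he : ((k:Int) - 1) = ((k-1 : Nat) : Int) := by omega
      rw [if_pos (by omega), he, PySem.List.pyGetD_natCast]
      rcases h : flags.getD (k-1) false <;> simp [Nat.pos_iff_ne_zero.mp h0]
  have hnext : (if ((k:Int) + 1) < (toks.length : Int) then PySem.List.pyGetD flags ((k:Int)+1) false else false)
      = if toks.length ≤ k + 1 ∨ flags.getD (k+1) false = false then false else true := by
    have he : ((k:Int) + 1) = ((k+1 : Nat) : Int) := by omega
    rcases Nat.lt_or_ge (k+1) toks.length with h1 | h1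
    · rw [if_pos (by push_cast; omega), he, PySem.List.pyGetD_natCast]
      have h2 : ¬ toks.length ≤ k + 1 := by omega
      rcases h : flags.getD (k+1) false <;> simp [h, h2]
    · rw [if_neg (by push_cast; omega), if_pos (Or.inl h1)]
  by_cases hc : flags.getD k false = true
  · unfold token_transfer_by_titles
    simp only [hlast, hnext, PySem.List.pyGetD_natCast, PySem.List.pySetD_natCast, hc, if_pos]
    unfold decor
    by_cases hL : k = 0 ∨ flags.getD (k-1) false = false <;>
      by_cases hR : toks.length ≤ k + 1 ∨ flags.getD (k+1) false = false <;>
      simp only [hc, hL, hR, if_true, ite_true, if_false, ite_false, Bool.not_false, Bool.not_true, Bool.false_eq_true, Bool.true_eq_false, eq_self_iff_true, not_false_iff, if_neg, if_pos] <;>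
    all_goals
      (first
        | rw [set_prepend, set_append, modify_modify_same]
        | rw [set_prepend]
        | rw [set_append]
        | (conv_lhs => rw [← modify_id toks k])) <;>
      (congr 1 <;> funext t <;> simp)
  · unfold token_transfer_by_titles decor
    simp only [PySem.List.pyGetD_natCast, hc]
    simp [hc, modify_id]

theorem tt_eq_modify_labels (toks : List String) (flags : List Bool) (k : Nat)
    (hk : k < toks.length) :
    token_transfer_by_labels toks flags (k : Int) ((k : Int) - 1) ((k : Int) + 1)
      = toks.modify k (decor flags "<u>" "</u>" toks.length k) := by
  have hlast : (if ((k:Int) - 1) > -1 then PySem.List.pyGetD flags ((k:Int)-1) false else false)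
      = if k = 0 ∨ flags.getD (k-1) false = false then false else true := by
    rcases Nat.eq_zero_or_pos k with h0 | h0
    · subst h0; norm_num
    · have he : ((k:Int) - 1) = ((k-1 : Nat) : Int) := by omega
      rw [if_pos (by omega), he, PySem.List.pyGetD_natCast]
      rcases h : flags.getD (k-1) false <;> simp [Nat.pos_iff_ne_zero.mp h0]
  have hnext : (if ((k:Int) + 1) < (toks.length : Int) then PySem.List.pyGetD flags ((k:Int)+1) false else false)
      = if toks.length ≤ k + 1 ∨ flags.getD (k+1) false = false then false else true := by
    have he : ((k:Int) + 1) = ((k+1 : Nat) : Int) := by omega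
    rcases Nat.lt_or_ge (k+1) toks.length with h1 | h1
    · rw [if_pos (by push_cast; omega), he, PySem.List.pyGetD_natCast]
      have h2 : ¬ toks.length ≤ k + 1 := by omega
      rcases h : flags.getD (k+1) false <;> simp [h, h2]
    · rw [if_neg (by push_cast; omega), if_pos (Or.inl h1)]
  by_cases hc : flags.getD k false = true
  · unfold token_transfer_by_labels
    simp only [hlast, hnext, PySem.List.pyGetD_natCast, PySem.List.pySetD_natCast, hc, if_pos]
    unfold decor
    by_cases hL : k = 0 ∨ flags.getD (k-1) false = false <;>
      by_cases hR : toks.length ≤ k + 1 ∨ flags.getD (k+1) false = false <;>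
      simp only [hc, hL, hR, if_true, ite_true, if_false, ite_false, Bool.not_false, Bool.not_true, Bool.false_eq_true, Bool.true_eq_false, eq_self_iff_true, not_false_iff, if_neg, if_pos] <;>
    all_goals
      (first
        | rw [set_prepend, set_append, modify_modify_same]
        | rw [set_prepend]
        | rw [set_append]
        | (conv_lhs => rw [← modify_id toks k])) <;>
      (congr 1 <;> funext t <;> simp)
  · unfold token_transfer_by_labels decor
    simp only [PySem.List.pyGetD_natCast, hc]
    simp [hc, modify_id]

theorem tt_eq_modify_emphasizes (toks : List String) (flags : List Bool) (k : Nat)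
    (hk : k < toks.length) :
    token_transfer_by_emphasizes toks flags (k : Int) ((k : Int) - 1) ((k : Int) + 1)
      = toks.modify k (decor flags "<span style=\"background-color:rgba(255, 87, 51, 0.5);\">" "</span>" toks.length k) := by
  have hlast : (if ((k:Int) - 1) > -1 then PySem.List.pyGetD flags ((k:Int)-1) false else false)
      = if k = 0 ∨ flags.getD (k-1) false = false then false else true := by
    rcases Nat.eq_zero_or_pos k with h0 | h0
    · subst h0; norm_num
    · have he : ((k:Int) - 1) = ((k-1 : Nat) : Int) := by omega
      rw [if_pos (by omega), he, PySem.List.pyGetD_natCast]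
      rcases h : flags.getD (k-1) false <;> simp [Nat.pos_iff_ne_zero.mp h0]
  have hnext : (if ((k:Int) + 1) < (toks.length : Int) then PySem.List.pyGetD flags ((k:Int)+1) false else false)
      = if toks.length ≤ k + 1 ∨ flags.getD (k+1) false = false then false else true := by
    have he : ((k:Int) + 1) = ((k+1 : Nat) : Int) := by omega
    rcases Nat.lt_or_ge (k+1) toks.length with h1 | h1
    · rw [if_pos (by push_cast; omega), he, PySem.List.pyGetD_natCast]
      have h2 : ¬ toks.length ≤ k + 1 := by omega
      rcases h : flags.getD (k+1) false <;> simp [h, h2]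
    · rw [if_neg (by push_cast; omega), if_pos (Or.inl h1)]
  by_cases hc : flags.getD k false = true
  · unfold token_transfer_by_emphasizes
    simp only [hlast, hnext, PySem.List.pyGetD_natCast, PySem.List.pySetD_natCast, hc, if_pos]
    unfold decor
    by_cases hL : k = 0 ∨ flags.getD (k-1) false = false <;>
      by_cases hR : toks.length ≤ k + 1 ∨ flags.getD (k+1) false = false <;>
      simp only [hc, hL, hR, if_true, ite_true, if_false, ite_false, Bool.not_false, Bool.not_true, Bool.false_eq_true, Bool.true_eq_false, eq_self_iff_true, not_false_iff, if_neg, if_pos] <;>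
    all_goals
      (first
        | rw [set_prepend, set_append, modify_modify_same]
        | rw [set_prepend]
        | rw [set_append]
        | (conv_lhs => rw [← modify_id toks k])) <;>
      (congr 1 <;> funext t <;> simp)
  · unfold token_transfer_by_emphasizes decor
    simp only [PySem.List.pyGetD_natCast, hc]
    simp [hc, modify_id]

theorem stepB_char (n : Nat) (flags : List Bool) (l r : String) (toks : List String)
    (m : Nat) (hm : m < n) :
    stepB n flags l r (toks, insideInv n flags m) m
      = (toks.modify m (decor flags l r n m), insideInv n flags (m+1)) := by
  by_cases hc : flags.getD m false = true
  · by_cases hL : m = 0 ∨ flags.getD (m-1) false = false <;>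
      by_cases hR : n ≤ m + 1 ∨ flags.getD (m+1) false = false
    · have hbm : insideInv n flags m = false := by
        unfold insideInv
        rcases hL with h | h
        · subst h; simp
        · rw [h]; simp
      have hbm1 : insideInv n flags (m+1) = false := by
        unfold insideInv
        rcases hR with h | h
        · have h2 : ¬ (m + 1 < n) := by omega
          simp [h2]
        · rw [h]; simp
      rw [hbm, hbm1]
      unfold stepB decor
      simp only [hc, hL, hR, if_true, ite_true, if_false, ite_false, Bool.false_eq_true,
        Bool.true_eq_false, eq_self_iff_true, if_neg, if_pos]
      simp only [Prod.mk.injEq]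
      refine ⟨?_, by trivial⟩
      rw [set_prepend, set_append, modify_modify_same]
      try (congr 1; funext t; simp [String.append_assoc])
    · have hbm : insideInv n flags m = false := by
        unfold insideInv
        rcases hL with h | h
        · subst h; simp
        · rw [h]; simp
      have hbm1 : insideInv n flags (m+1) = true := by
        unfold insideInv
        simp only [Nat.add_sub_cancel]
        push_neg at hR
        have h2 : m + 1 < n := by omega
        have h4 : flags.getD (m+1) false = true := by
          rcases hfb : flags.getD (m+1) false
          · exact absurd hfb hR.2
          · rfl
        rw [hc, h4]; simp [h2]
      rw [hbm, hbm1]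
      unfold stepB decor
      simp only [hc, hL, hR, if_true, ite_true, if_false, ite_false, Bool.false_eq_true,
        Bool.true_eq_false, eq_self_iff_true, if_neg, if_pos]
      simp only [Prod.mk.injEq]
      refine ⟨?_, by trivial⟩
      rw [set_prepend]
      try (congr 1; funext t; simp)
    · have hbm : insideInv n flags m = true := by
        unfold insideInv
        push_neg at hL
        have h3 : flags.getD (m-1) false = true := by
          rcases hfb : flags.getD (m-1) false
          · exact absurd hfb hL.2
          · rfl
        rw [h3, hc]; simp [hm, Nat.pos_of_ne_zero hL.1]
      have hbm1 : insideInv n flags (m+1) = false := by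
        unfold insideInv
        rcases hR with h | h
        · have h2 : ¬ (m + 1 < n) := by omega
          simp [h2]
        · rw [h]; simp
      rw [hbm, hbm1]
      unfold stepB decor
      simp only [hc, hL, hR, if_true, ite_true, if_false, ite_false, Bool.false_eq_true,
        Bool.true_eq_false, eq_self_iff_true, if_neg, if_pos]
      simp only [Prod.mk.injEq]
      refine ⟨?_, by trivial⟩
      rw [set_append]
      rw [show (fun t : String => "" ++ t ++ r) = (fun t => t ++ r) from by funext t; simp]
    · have hbm : insideInv n flags m = true := by
        unfold insideInv
        push_neg at hL
        have h3 : flags.getD (m-1) false = true := by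
          rcases hfb : flags.getD (m-1) false
          · exact absurd hfb hL.2
          · rfl
        rw [h3, hc]; simp [hm, Nat.pos_of_ne_zero hL.1]
      have hbm1 : insideInv n flags (m+1) = true := by
        unfold insideInv
        simp only [Nat.add_sub_cancel]
        push_neg at hR
        have h2 : m + 1 < n := by omega
        have h4 : flags.getD (m+1) false = true := by
          rcases hfb : flags.getD (m+1) false
          · exact absurd hfb hR.2
          · rfl
        rw [hc, h4]; simp [h2]
      rw [hbm, hbm1]
      unfold stepB decor
      simp only [hc, hL, hR, if_true, ite_true, if_false, ite_false, Bool.false_eq_true,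
        Bool.true_eq_false, eq_self_iff_true, if_neg, if_pos]
      simp only [Prod.mk.injEq]
      refine ⟨?_, by trivial⟩
      conv_lhs => rw [← modify_id toks m]
      try (congr 1; funext t; simp [hc])
  · have hb : flags.getD m false = false := by revert hc; cases flags.getD m false <;> simp
    have hbm : insideInv n flags m = false := by unfold insideInv; rw [hb]; simp
    have hbm1 : insideInv n flags (m+1) = false := by
      unfold insideInv
      simp only [Nat.add_sub_cancel]
      rw [hb]; simp
    rw [hbm, hbm1]
    unfold stepB decor
    simp only [hb, Bool.false_eq_true, if_false, ite_false]
    simp only [Prod.mk.injEq]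
    refine ⟨?_, by trivial⟩
    conv_lhs => rw [← modify_id toks m]
    try (congr 1; funext t; simp [hb])
-- end stepB_char

theorem foldB_inv (n : Nat) (flags : List Bool) (l r : String) (toks : List String) :
    ∀ m, m ≤ n →
    (List.range m).foldl (stepB n flags l r) (toks, false)
      = ((List.range m).foldl (fun t i => t.modify i (decor flags l r n i)) toks, insideInv n flags m) := by
  intro m
  induction m with
  | zero => intro _; simp [insideInv]
  | succ m ih =>
    intro h
    rw [List.range_succ, List.foldl_append, List.foldl_append, ih (by omega)]
    simp only [List.foldl_cons, List.foldl_nil]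
    exact stepB_char n flags l r _ m (by omega)

theorem mark_runs_eq_fold (n : Nat) (flags : List Bool) (l r : String) (toks : List String) :
    mark_runs n flags l r toks
      = (List.range n).foldl (fun t i => t.modify i (decor flags l r n i)) toks := by
  have h : mark_runs n flags l r toks
      = ((List.range n).foldl (stepB n flags l r) (toks, false)).1 := rfl
  rw [h, foldB_inv n flags l r toks n le_rfl]

theorem fold_modify_push (h : Nat → String → String) (j : Nat) (φ : String → String) :
    ∀ (m : Nat), m ≤ j → ∀ (toks : List String),
    (List.range m).foldl (fun t i => t.modify i (h i)) (toks.modify j φ)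
      = ((List.range m).foldl (fun t i => t.modify i (h i)) toks).modify j φ := by
  intro m
  induction m with
  | zero => intro _ toks; simp
  | succ m ih =>
    intro hm toks
    rw [List.range_succ, List.foldl_append, List.foldl_append]
    simp only [List.foldl_cons, List.foldl_nil]
    rw [ih (by omega), modify_comm _ j m (by omega) φ (h m)]

theorem fold_modify_fuse (g h : Nat → String → String) :
    ∀ (m : Nat) (toks : List String),
    (List.range m).foldl (fun t i => t.modify i (h i))
        ((List.range m).foldl (fun t i => t.modify i (g i)) toks)
      = (List.range m).foldl (fun t i => t.modify i (fun s => h i (g i s))) toks := by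
  intro m
  induction m with
  | zero => intro toks; simp
  | succ m ih =>
    intro toks
    rw [List.range_succ]
    simp only [List.foldl_append, List.foldl_cons, List.foldl_nil]
    rw [fold_modify_push h m (g m) m le_rfl, ih, modify_modify_same]

theorem fold_modify_length (f : Nat → String → String) :
    ∀ (m : Nat) (toks : List String),
    ((List.range m).foldl (fun t i => t.modify i (f i)) toks).length = toks.length := by
  intro m
  induction m with
  | zero => intro toks; simp
  | succ m ih =>
    intro toks
    rw [List.range_succ, List.foldl_append]
    simp only [List.foldl_cons, List.foldl_nil]
    rw [List.length_modify, ih]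

theorem foldA_eq (emph : Option (List Bool)) (ls titles : List Bool) (n : Nat) :
    ∀ (m : Nat), m ≤ n → ∀ (toks : List String), toks.length = n →
    List.foldl (fun (x : List String) (y : Nat) =>
        match emph with
        | some e =>
          if e ≠ [] then
            token_transfer_by_emphasizes
              (token_transfer_by_labels
                (token_transfer_by_titles x titles (y : Int) ((y : Int) - 1) ((y : Int) + 1))
                ls (y : Int) ((y : Int) - 1) ((y : Int) + 1))
              e (y : Int) ((y : Int) - 1) ((y : Int) + 1)
          else
            token_transfer_by_labels
              (token_transfer_by_titles x titles (y : Int) ((y : Int) - 1) ((y : Int) + 1))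
              ls (y : Int) ((y : Int) - 1) ((y : Int) + 1)
        | none =>
          token_transfer_by_labels
            (token_transfer_by_titles x titles (y : Int) ((y : Int) - 1) ((y : Int) + 1))
            ls (y : Int) ((y : Int) - 1) ((y : Int) + 1)) toks (List.range m)
      = (List.range m).foldl (fun t i => t.modify i (decorAll emph ls titles n i)) toks := by
  intro m
  induction m with
  | zero => intro _ toks _; simp
  | succ m ih =>
    intro hm toks hlen
    rw [List.range_succ, List.foldl_append, List.foldl_append, ih (by omega) toks hlen]
    simp only [List.foldl_cons, List.foldl_nil]
    have hXlen : ((List.range m).foldl (fun t i => t.modify i (decorAll emph ls titles n i)) toks).length = n := by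
      rw [fold_modify_length, hlen]
    set X := (List.range m).foldl (fun t i => t.modify i (decorAll emph ls titles n i)) toks with hX
    have hmn : m < X.length := by omega
    have h1len : (X.modify m (decor titles "【" "】" X.length m)).length = X.length :=
      List.length_modify ..
    cases emph with
    | none =>
      dsimp only
      rw [tt_eq_modify_titles X titles m hmn, tt_eq_modify_labels _ ls m (by omega), h1len,
        modify_modify_same, hXlen]
      rfl
    | some e =>
      dsimp only
      by_cases he : e ≠ []
      · rw [if_pos he]
        rw [tt_eq_modify_titles X titles m hmn, tt_eq_modify_labels _ ls m (by omega), h1len,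
          modify_modify_same]
        have h2len : (X.modify m fun t =>
            decor ls "<u>" "</u>" X.length m (decor titles "【" "】" X.length m t)).length = X.length :=
          List.length_modify ..
        rw [tt_eq_modify_emphasizes _ e m (by omega), h2len, modify_modify_same, hXlen]
        congr 1
        funext t
        simp only [decorAll]
        rw [if_pos he]
      · rw [if_neg he]
        rw [tt_eq_modify_titles X titles m hmn, tt_eq_modify_labels _ ls m (by omega), h1len,
          modify_modify_same, hXlen]
        congr 1
        funext t
        simp only [decorAll]
        rw [if_neg he]

-- ===== VERDICT (by name: the statement is the Claim_ definition above) =====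
theorem print_sentence_spec : Claim_equal_print_sentence := by
  unfold Claim_equal_print_sentence Spec_print_sentence
  rintro ⟨tokens, ls, titles, paras⟩ emphasizes _ _
  unfold print_sentence print_sentence_alt
  dsimp only
  rw [PySem.List.pyRange_one]
  simp only [Int.sub_zero, Int.toNat_natCast, List.foldl_map, zero_add]
  rw [foldA_eq emphasizes ls titles tokens.length tokens.length le_rfl tokens rfl,
    PySem.List.pyGetD_zero]
  cases emphasizes with
  | none =>
    dsimp only
    rw [mark_runs_eq_fold, mark_runs_eq_fold, fold_modify_fuse]
    rfl
  | some e =>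
    dsimp only
    by_cases he : e ≠ []
    · rw [if_pos he, mark_runs_eq_fold, mark_runs_eq_fold, mark_runs_eq_fold,
        fold_modify_fuse, fold_modify_fuse]
      have hfun : (fun (t : List String) (i : Nat) => t.modify i (decorAll (some e) ls titles tokens.length i))
          = (fun (t : List String) (i : Nat) => t.modify i (fun s =>
              decor e "<span style=\"background-color:rgba(255, 87, 51, 0.5);\">" "</span>" tokens.length i
                (decor ls "<u>" "</u>" tokens.length i (decor titles "【" "】" tokens.length i s)))) := by
        funext t i
        congr 1
        funext s
        simp only [decorAll]
        rw [if_pos he]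
      rw [hfun]
    · rw [if_neg he, mark_runs_eq_fold, mark_runs_eq_fold, fold_modify_fuse]
      have hfun : (fun (t : List String) (i : Nat) => t.modify i (decorAll (some e) ls titles tokens.length i))
          = (fun (t : List String) (i : Nat) => t.modify i (fun s =>
              decor ls "<u>" "</u>" tokens.length i (decor titles "【" "】" tokens.length i s))) := by
        funext t i
        congr 1
        funext s
        simp only [decorAll]
        rw [if_neg he]
      rw [hfun]
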